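-- pv_equiv track=rewrite | github.com/Astrocyte74/-YTV2-NAS- | modules/services/draw_service.py | _humanize_label
-- ===== SOURCE A (Python) =====
-- from typing import Any, Dict, List, Optional, Tuple
--
-- def _humanize_label(key: str) -> str:
--     if not key:
--         return ""
--     if key.startswith("flux_"):
--         tail = key.split("_", 1)[1] if "_" in key else key
--         pretty_tail = _humanize_label(tail)
--         return f"Flux · {pretty_tail}"
--     segments = [seg.strip() for seg in key.replace("-", "_").split("_") if seg.strip()]
--     words: List[str] = []
--     for seg in segments:
--         lower = seg.lower()
--         if lower == "nsfw":
--             words.append("NSFW")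
--         elif seg.isupper():
--             words.append(seg)
--         else:
--             words.append(seg.capitalize())
--     return " ".join(words) if words else key
-- ===== SOURCE B (Python) =====
-- def _word(seg: str) -> str:
--     if seg.lower() == "nsfw":
--         return "NSFW"
--     if seg.isupper():
--         return seg
--     return seg.capitalize()
--
--
-- def _humanize_label(key: str) -> str:
--     count = 0
--     while key.startswith("flux_"):
--         key = key[5:]
--         count += 1
--     words = []
--     cur = []
--     for ch in key + "_":  # sentinel separator flushes the last segment
--         if ch == "_" or ch == "-":
--             seg = "".join(cur).strip()
--             if seg:
--                 words.append(_word(seg))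
--             cur = []
--         else:
--             cur.append(ch)
--     base = " ".join(words) if words else key
--     return "Flux · " * count + base
-- ===== Notes on version B (the rewrite author's own statement) =====
-- stated objective: alternative
-- what changed: A recurses once per repetition of the flux prefix and humanizes via a replace+split+strip pipeline over intermediate strings; B strips all such prefixes in one iterative loop, tokenizes the remainder in a single character scan with a sentinel separator, and prepends the prefix label once per stripped repetition.
import Mathlib
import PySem

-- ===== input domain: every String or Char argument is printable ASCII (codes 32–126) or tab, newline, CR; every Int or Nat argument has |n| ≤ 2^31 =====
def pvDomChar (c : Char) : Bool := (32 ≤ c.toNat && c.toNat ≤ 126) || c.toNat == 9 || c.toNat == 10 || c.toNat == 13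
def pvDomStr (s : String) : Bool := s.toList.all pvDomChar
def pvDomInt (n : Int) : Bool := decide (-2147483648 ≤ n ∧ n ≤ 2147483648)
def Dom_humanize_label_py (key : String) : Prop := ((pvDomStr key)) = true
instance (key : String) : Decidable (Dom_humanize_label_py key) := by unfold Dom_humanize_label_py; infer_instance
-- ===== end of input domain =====

-- B replaces A's recursion on the 'flux_' prefix by an iterative prefix strip and replaces the
-- replace+split+strip pipeline by a single character-scan tokenizer; objective: alternative.

-- ===== PORT A =====

-- Python str.isupper(): some cased char, and no lowercase one (exact on the ASCII domain, where the cased chars are the letters)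
def pvStrIsupper (s : List Char) : Bool :=
  s.any (fun c => PySem.Chars.isupper c || PySem.Chars.islower c) && s.all (fun c => !PySem.Chars.islower c)

-- Python str.capitalize(): first char uppercased, the rest lowercased (exact on the ASCII domain)
def pvStrCapitalize (s : List Char) : List Char :=
  match s with
  | [] => []
  | c :: rest => PySem.Chars.upperChar c :: PySem.Chars.lower rest

-- tail = key.split("_", 1)[1] if "_" in key else key
def pvFluxTailA (cs : List Char) : List Char :=
  if PySem.Chars.isIn "_".toList cs then (PySem.Chars.splitOnMax cs "_".toList 1).getD 1 cs else cs

-- termination of A's recursion: the tail after a 'flux_' prefix is strictly shorter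
lemma pv_go_step_nonsep (fuel : Nat) (m : Nat) (c : Char) (t cur : List Char)
    (acc : List (List Char)) (hc : ¬ c = '_') (hm : ¬ m = 0) :
    PySem.Chars.splitOnMax.go ['_'] (fuel + 1) m (c :: t) cur acc =
      PySem.Chars.splitOnMax.go ['_'] fuel m t (c :: cur) acc := by
  rw [PySem.Chars.splitOnMax.go.eq_def]
  have hp : ['_'].isPrefixOf (c :: t) = false := by
    simp [List.isPrefixOf]; exact fun e => hc e.symm
  simp [hm, hp]

lemma pv_go_step_sep (fuel : Nat) (m : Nat) (t cur : List Char)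
    (acc : List (List Char)) (hm : ¬ m = 0) :
    PySem.Chars.splitOnMax.go ['_'] (fuel + 1) m ('_' :: t) cur acc =
      PySem.Chars.splitOnMax.go ['_'] fuel (m - 1) t [] (cur.reverse :: acc) := by
  rw [PySem.Chars.splitOnMax.go.eq_def]
  have hp : ['_'].isPrefixOf ('_' :: t) = true := by simp [List.isPrefixOf]
  simp [hm, hp]

lemma pv_go_m0 : ∀ (fuel : Nat) (l cur : List Char) (acc : List (List Char)),
    PySem.Chars.splitOnMax.go ['_'] fuel 0 l cur acc = ((cur.reverse ++ l) :: acc).reverse := by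
  intro fuel l cur acc
  rw [PySem.Chars.splitOnMax.go.eq_def]
  cases fuel with
  | zero => simp
  | succ n => cases l with
    | nil => simp
    | cons c t => simp

lemma pv_splitOnMax_flux (rest : List Char) :
    PySem.Chars.splitOnMax ("flux_".toList ++ rest) "_".toList 1 = ["flux".toList, rest] := by
  show PySem.Chars.splitOnMax ('f'::'l'::'u'::'x'::'_'::rest) ['_'] 1 = [['f','l','u','x'], rest]
  rw [PySem.Chars.splitOnMax]
  rw [if_neg (by norm_num)]
  have e1 : PySem.Chars.splitOnMax.go ['_'] (('f'::'l'::'u'::'x'::'_'::rest).length + 1) (Int.toNat 1)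
      ('f'::'l'::'u'::'x'::'_'::rest) [] [] =
      PySem.Chars.splitOnMax.go ['_'] (rest.length + 5) 1 ('l'::'u'::'x'::'_'::rest) ['f'] [] :=
    pv_go_step_nonsep (rest.length + 5) 1 'f' _ _ _ (by decide) (by decide)
  rw [e1]
  rw [pv_go_step_nonsep (rest.length + 4) 1 'l' ('u'::'x'::'_'::rest) ['f'] [] (by decide) (by decide)]
  rw [pv_go_step_nonsep (rest.length + 3) 1 'u' ('x'::'_'::rest) ['l','f'] [] (by decide) (by decide)]
  rw [pv_go_step_nonsep (rest.length + 2) 1 'x' ('_'::rest) ['u','l','f'] [] (by decide) (by decide)]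
  rw [pv_go_step_sep (rest.length + 1) 1 rest ['x','u','l','f'] [] (by decide)]
  rw [pv_go_m0]
  simp

lemma pvFluxTailA_eq_drop (cs : List Char) (h : PySem.Chars.startswith cs "flux_".toList = true) :
    pvFluxTailA cs = cs.drop 5 := by
  rcases (PySem.Chars.startswith_iff _ _).mp h with ⟨rest, hr⟩
  subst hr
  have hin : PySem.Chars.isIn "_".toList ("flux_".toList ++ rest) = true := by
    rw [PySem.Chars.isIn_iff_infix]
    exact ⟨"flux".toList, rest, rfl⟩
  unfold pvFluxTailA
  rw [if_pos hin, pv_splitOnMax_flux]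
  rfl

lemma pvFluxTailA_lt (cs : List Char) (h : PySem.Chars.startswith cs "flux_".toList = true) :
    (pvFluxTailA cs).length < cs.length := by
  rcases (PySem.Chars.startswith_iff _ _).mp h with ⟨rest, hr⟩
  rw [pvFluxTailA_eq_drop cs h]
  subst hr
  simp
  omega

def pvHumanizeA (cs : List Char) : List Char :=
  if cs = [] then []
  else if h : PySem.Chars.startswith cs "flux_".toList then
    "Flux · ".toList ++ pvHumanizeA (pvFluxTailA cs)
  else
    let segments := ((PySem.Chars.splitOn (PySem.Chars.replace cs "-".toList "_".toList)
        "_".toList).map PySem.Chars.strip).filter (fun s => s ≠ [])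
    let words := segments.foldl (fun ws seg =>
        let lower := PySem.Chars.lower seg
        if lower = "nsfw".toList then ws ++ ["NSFW".toList]
        else if pvStrIsupper seg then ws ++ [seg]
        else ws ++ [pvStrCapitalize seg]) []
    if words ≠ [] then PySem.Chars.join " ".toList words else cs
termination_by cs.length
decreasing_by exact pvFluxTailA_lt cs h

def humanize_label_py (key : String) : String := String.mk (pvHumanizeA key.toList)

-- ===== PORT B =====

lemma pv_flux_len (cs : List Char) (h : PySem.Chars.startswith cs "flux_".toList = true) :
    5 ≤ cs.length := by
  rcases (PySem.Chars.startswith_iff _ _).mp h with ⟨rest, hr⟩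
  subst hr; simp

-- the while loop: state (key, count)
def pvStripFluxB (cs : List Char) (count : Nat) : Nat × List Char :=
  if h : PySem.Chars.startswith cs "flux_".toList then pvStripFluxB (cs.drop 5) (count + 1)
  else (count, cs)
termination_by cs.length
decreasing_by have := pv_flux_len cs h; simp; omega

def pvWordB (seg : List Char) : List Char :=
  if PySem.Chars.lower seg = "nsfw".toList then "NSFW".toList
  else if pvStrIsupper seg then seg
  else pvStrCapitalize seg

def pvStepB (st : List (List Char) × List Char) (ch : Char) : List (List Char) × List Char :=
  if ch = '_' || ch = '-' then
    let seg := PySem.Chars.strip st.2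
    (if seg ≠ [] then st.1 ++ [pvWordB seg] else st.1, [])
  else (st.1, st.2 ++ [ch])

def pvHumanizeB (cs : List Char) : List Char :=
  let sc := pvStripFluxB cs 0
  let words := ((sc.2 ++ ['_']).foldl pvStepB ([], [])).1
  let base := if words ≠ [] then PySem.Chars.join " ".toList words else sc.2
  (List.replicate sc.1 "Flux · ".toList).flatten ++ base

def humanize_label_py_alt (key : String) : String := String.mk (pvHumanizeB key.toList)

-- ===== PRECONDITION & SPEC =====
def Spec_humanize_label_py (key : String) (out : String) : Prop := out = humanize_label_py_alt key
instance (key : String) (out : String) : Decidable (Spec_humanize_label_py key out) := by unfold Spec_humanize_label_py; infer_instance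

-- ===== CLAIM (what is proved, stated in full; the proofs are below) =====
def Claim_equal_humanize_label_py : Prop := ∀ (key : String), Dom_humanize_label_py key → Spec_humanize_label_py key (humanize_label_py key)

-- ===== LEMMAS AND PROOFS =====

-- split a char list at every char satisfying p (Python ''.split(sep) semantics: keeps empty pieces)
def pvSplit (p : Char → Bool) (cs : List Char) : List (List Char) :=
  match cs with
  | [] => [[]]
  | c :: rest =>
    if p c then [] :: pvSplit p rest
    else
      match pvSplit p rest with
      | s :: ss => (c :: s) :: ss
      | [] => [[c]]

def pvDash (c : Char) : Char := if c = '-' then '_' else c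

lemma pvSplit_ne_nil (p : Char → Bool) (cs : List Char) : pvSplit p cs ≠ [] := by
  cases cs with
  | nil => simp [pvSplit]
  | cons c rest =>
    simp only [pvSplit]
    split
    · simp
    · rcases h : pvSplit p rest with _ | ⟨s, ss⟩ <;> simp

lemma pv_replace_go_dash : ∀ (fuel : Nat) (l acc : List Char), l.length ≤ fuel →
    PySem.Chars.replace.go ['-'] ['_'] fuel l acc = acc.reverse ++ l.map pvDash := by
  intro fuel
  induction fuel with
  | zero => intro l acc h; simp at h; subst h; simp [PySem.Chars.replace.go]
  | succ n ih =>
    intro l acc h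
    cases l with
    | nil => simp [PySem.Chars.replace.go]
    | cons c t =>
      rw [PySem.Chars.replace.go.eq_def]
      by_cases hc : c = '-'
      · subst hc
        have hp : ['-'].isPrefixOf ('-' :: t) = true := by simp [List.isPrefixOf]
        simp only [hp]
        exact ((ih t ('_' :: acc) (by simpa using Nat.le_of_succ_le_succ h)).trans (by simp [pvDash]))
      · have hp : ['-'].isPrefixOf (c :: t) = false := by
          simp [List.isPrefixOf]; exact fun e => hc e.symm
        simp only [hp, Bool.false_eq_true, if_false]
        exact ((ih t (c :: acc) (by simpa using Nat.le_of_succ_le_succ h)).trans (by simp [pvDash, hc]))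

lemma pv_replace_dash (cs : List Char) :
    PySem.Chars.replace cs "-".toList "_".toList = cs.map pvDash := by
  show PySem.Chars.replace cs ['-'] ['_'] = cs.map pvDash
  rw [PySem.Chars.replace]
  rw [if_neg (by simp)]
  exact pv_replace_go_dash _ _ _ (Nat.le_refl _)

lemma pv_splitOn_go_us : ∀ (fuel : Nat) (l cur : List Char) (acc : List (List Char)),
    l.length < fuel →
    PySem.Chars.splitOn.go ['_'] fuel l cur acc =
      acc.reverse ++ (match pvSplit (fun c => c = '_') l with
        | s :: ss => (cur.reverse ++ s) :: ss
        | [] => [cur.reverse]) := by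
  intro fuel
  induction fuel with
  | zero => intro l cur acc h; omega
  | succ n ih =>
    intro l cur acc h
    cases l with
    | nil => simp [PySem.Chars.splitOn.go, pvSplit]
    | cons c t =>
      rw [PySem.Chars.splitOn.go.eq_def]
      by_cases hc : c = '_'
      · subst hc
        have hp : ['_'].isPrefixOf ('_' :: t) = true := by simp [List.isPrefixOf]
        simp only [hp, List.drop, List.length_cons, List.length_nil, if_pos trivial]
        rw [ih t [] (List.reverse cur :: acc) (by simpa using Nat.lt_of_succ_lt_succ h)]
        simp only [pvSplit]
        rcases hs : pvSplit (fun c => c = '_') t with _ | ⟨s, ss⟩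
        · exact absurd hs (pvSplit_ne_nil _ _)
        · simp
      · have hp : ['_'].isPrefixOf (c :: t) = false := by
          simp [List.isPrefixOf]; exact fun e => hc e.symm
        simp only [hp, Bool.false_eq_true, if_false]
        rw [ih t (c :: cur) acc (by simpa using Nat.lt_of_succ_lt_succ h)]
        simp only [pvSplit, hc, if_false, decide_eq_true_eq]
        rcases hs : pvSplit (fun c => c = '_') t with _ | ⟨s, ss⟩
        · exact absurd hs (pvSplit_ne_nil _ _)
        · simp

lemma pv_splitOn_us (cs : List Char) :
    PySem.Chars.splitOn cs "_".toList = pvSplit (fun c => c = '_') cs := by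
  show PySem.Chars.splitOn cs ['_'] = _
  rw [PySem.Chars.splitOn]
  rw [pv_splitOn_go_us (cs.length + 1) cs [] [] (Nat.lt_succ_self _)]
  rcases hs : pvSplit (fun c => c = '_') cs with _ | ⟨s, ss⟩
  · exact absurd hs (pvSplit_ne_nil _ _)
  · simp

lemma pvSplit_map_dash (cs : List Char) :
    pvSplit (fun c => c = '_') (cs.map pvDash) = pvSplit (fun c => c = '_' || c = '-') cs := by
  induction cs with
  | nil => rfl
  | cons c t ih =>
    simp only [List.map_cons, pvSplit, ih]
    by_cases hc : pvDash c = '_'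
    · have : (c = '_' || c = '-') = true := by
        unfold pvDash at hc; split_ifs at hc with h <;> simp [h, hc]
      simp [hc, this]
    · have h1 : ¬ c = '-' := fun e => hc (by simp [pvDash, e])
      have h2 : ¬ c = '_' := fun e => hc (by simp [pvDash, e, h1])
      have hd : pvDash c = c := by simp [pvDash, h1]
      simp [hc, h1, h2, hd]

lemma pv_foldl_stepA : ∀ (l : List (List Char)) (ws : List (List Char)),
    l.foldl (fun ws seg =>
        let lower := PySem.Chars.lower seg
        if lower = "nsfw".toList then ws ++ ["NSFW".toList]
        else if pvStrIsupper seg then ws ++ [seg]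
        else ws ++ [pvStrCapitalize seg]) ws = ws ++ l.map pvWordB := by
  intro l
  induction l with
  | nil => intro ws; simp
  | cons seg t ih =>
    intro ws
    simp only [List.foldl_cons, List.map_cons]
    have hstep : (let lower := PySem.Chars.lower seg
        if lower = "nsfw".toList then ws ++ ["NSFW".toList]
        else if pvStrIsupper seg then ws ++ [seg]
        else ws ++ [pvStrCapitalize seg]) = ws ++ [pvWordB seg] := by
      show (if PySem.Chars.lower seg = "nsfw".toList then ws ++ ["NSFW".toList]
        else if pvStrIsupper seg then ws ++ [seg]
        else ws ++ [pvStrCapitalize seg]) = ws ++ [pvWordB seg]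
      unfold pvWordB; split_ifs <;> rfl
    rw [hstep, ih]
    simp

lemma pvSplit_sepfree_append (p : Char → Bool) (cur xs : List Char)
    (h : ∀ c ∈ cur, p c = false) :
    pvSplit p (cur ++ xs) =
      match pvSplit p xs with
      | s :: ss => (cur ++ s) :: ss
      | [] => [cur] := by
  induction cur with
  | nil =>
    rcases hs : pvSplit p xs with _ | ⟨s, ss⟩
    · exact absurd hs (pvSplit_ne_nil _ _)
    · simp [hs]
  | cons c t ih =>
    have hc : p c = false := h c List.mem_cons_self
    have ht : ∀ x ∈ t, p x = false := fun x hx => h x (List.mem_cons_of_mem _ hx)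
    simp only [List.cons_append, pvSplit, hc, Bool.false_eq_true, if_false, ih ht]
    rcases hs : pvSplit p xs with _ | ⟨s, ss⟩
    · exact absurd hs (pvSplit_ne_nil _ _)
    · simp

lemma pv_tokenizer : ∀ (cs cur : List Char) (ws : List (List Char)),
    (∀ c ∈ cur, (c = '_' || c = '-') = false) →
    ((cs ++ ['_']).foldl pvStepB (ws, cur)).1 =
      ws ++ (((pvSplit (fun c => c = '_' || c = '-') (cur ++ cs)).map
        PySem.Chars.strip).filter (fun s => s ≠ [])).map pvWordB := by
  intro cs
  induction cs with
  | nil =>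
    intro cur ws h
    rw [pvSplit_sepfree_append _ _ _ h]
    simp only [List.nil_append, List.foldl_cons, List.foldl_nil, pvSplit]
    unfold pvStepB
    simp only [if_pos (by decide : ('_' = '_' || '_' = '-') = true)]
    by_cases hs : PySem.Chars.strip cur = [] <;> simp [hs]
  | cons c t ih =>
    intro cur ws h
    by_cases hc : (c = '_' || c = '-') = true
    · have hsplit : pvSplit (fun c => c = '_' || c = '-') (cur ++ c :: t) =
          cur :: pvSplit (fun c => c = '_' || c = '-') t := by
        rw [pvSplit_sepfree_append _ _ _ h]
        simp only [pvSplit, hc, if_true]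
        rcases hs : pvSplit (fun c => c = '_' || c = '-') t with _ | ⟨s, ss⟩
        · exact absurd hs (pvSplit_ne_nil _ _)
        · simp
      have hstep : pvStepB (ws, cur) c =
          (if PySem.Chars.strip cur ≠ [] then ws ++ [pvWordB (PySem.Chars.strip cur)] else ws, []) := by
        unfold pvStepB; rw [if_pos hc]
      simp only [List.cons_append, List.foldl_cons, hstep]
      rw [ih [] _ (by intro x hx; cases hx)]
      rw [hsplit]
      simp only [List.nil_append, List.map_cons, List.filter_cons]
      by_cases hs : PySem.Chars.strip cur = [] <;> simp [hs]
    · have hstep : pvStepB (ws, cur) c = (ws, cur ++ [c]) := by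
        unfold pvStepB; rw [if_neg (by simpa using hc)]
      simp only [List.cons_append, List.foldl_cons, hstep]
      have h' : ∀ x ∈ cur ++ [c], (x = '_' || x = '-') = false := by
        intro x hx
        rcases List.mem_append.mp hx with hx | hx
        · exact h x hx
        · simp at hx; subst hx; simpa using hc
      rw [ih (cur ++ [c]) ws h']
      simp

lemma pvStripFluxB_shift : ∀ (k : Nat) (cs : List Char), cs.length ≤ k → ∀ (n : Nat),
    pvStripFluxB cs n = ((pvStripFluxB cs 0).1 + n, (pvStripFluxB cs 0).2) := by
  intro k
  induction k with
  | zero =>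
    intro cs hk n
    have hcs : cs = [] := by simpa using hk
    subst hcs
    have hf : ¬ PySem.Chars.startswith ([] : List Char) "flux_".toList = true := by decide
    rw [pvStripFluxB, dif_neg hf]
    conv_rhs => rw [pvStripFluxB]; rw [dif_neg hf]
    simp
  | succ k ih =>
    intro cs hk n
    by_cases h : PySem.Chars.startswith cs "flux_".toList = true
    · have h5 := pv_flux_len cs h
      have hlen : (cs.drop 5).length ≤ k := by simp; omega
      rw [pvStripFluxB]
      rw [dif_pos h]
      rw [ih _ hlen (n + 1)]
      conv_rhs => rw [pvStripFluxB]; rw [dif_pos h]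
      rw [ih _ hlen 1]
      simp only [Prod.mk.injEq]
      exact ⟨by omega, trivial⟩
    · rw [pvStripFluxB, dif_neg h]
      conv_rhs => rw [pvStripFluxB]; rw [dif_neg h]
      simp

lemma pvHumanizeB_flux (cs : List Char) (h : PySem.Chars.startswith cs "flux_".toList = true) :
    pvHumanizeB cs = "Flux · ".toList ++ pvHumanizeB (cs.drop 5) := by
  unfold pvHumanizeB
  have h1 : pvStripFluxB cs 0 = ((pvStripFluxB (cs.drop 5) 0).1 + 1, (pvStripFluxB (cs.drop 5) 0).2) := by
    rw [pvStripFluxB, dif_pos h]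
    exact pvStripFluxB_shift (cs.drop 5).length _ (Nat.le_refl _) 1
  rw [h1]
  simp only [List.replicate_succ, List.flatten_cons, List.append_assoc]

lemma pvHumanizeA_flux (cs : List Char) (h : PySem.Chars.startswith cs "flux_".toList = true) :
    pvHumanizeA cs = "Flux · ".toList ++ pvHumanizeA (cs.drop 5) := by
  have hne : ¬ cs = [] := by
    intro e; subst e; exact absurd h (by decide)
  conv_lhs => rw [pvHumanizeA]
  rw [if_neg hne, dif_pos h, pvFluxTailA_eq_drop cs h]

lemma pvHumanizeB_empty : pvHumanizeB [] = [] := by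
  have hf : ¬ PySem.Chars.startswith ([] : List Char) "flux_".toList = true := by decide
  unfold pvHumanizeB
  rw [pvStripFluxB, dif_neg hf]
  simp [pvStepB, PySem.Chars.strip, PySem.Chars.lstrip, PySem.Chars.rstrip]

lemma pvAB_nonflux (cs : List Char) (hne : ¬ cs = [])
    (hf : ¬ PySem.Chars.startswith cs "flux_".toList = true) :
    pvHumanizeA cs = pvHumanizeB cs := by
  conv_lhs => rw [pvHumanizeA]
  rw [if_neg hne, dif_neg hf]
  have hsegs : ((PySem.Chars.splitOn (PySem.Chars.replace cs "-".toList "_".toList)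
      "_".toList).map PySem.Chars.strip).filter (fun s => s ≠ []) =
      ((pvSplit (fun c => c = '_' || c = '-') cs).map PySem.Chars.strip).filter (fun s => s ≠ []) := by
    rw [pv_replace_dash, pv_splitOn_us, pvSplit_map_dash]
  conv_rhs => rw [pvHumanizeB]
  rw [pvStripFluxB, dif_neg hf]
  simp only []
  rw [pv_tokenizer cs [] [] (by intro x hx; cases hx)]
  rw [pv_foldl_stepA]
  rw [hsegs]
  simp

lemma pvAB : ∀ (cs : List Char), pvHumanizeA cs = pvHumanizeB cs := by
  have H : ∀ (n : Nat) (cs : List Char), cs.length ≤ n → pvHumanizeA cs = pvHumanizeB cs := by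
    intro n
    induction n with
    | zero =>
      intro cs hk
      have hcs : cs = [] := by simpa using hk
      subst hcs
      rw [pvHumanizeA]
      simp [pvHumanizeB_empty]
    | succ n ih =>
      intro cs hk
      by_cases hne : cs = []
      · subst hne
        rw [pvHumanizeA]
        simp [pvHumanizeB_empty]
      · by_cases hf : PySem.Chars.startswith cs "flux_".toList = true
        · have h5 := pv_flux_len cs hf
          rw [pvHumanizeA_flux cs hf, pvHumanizeB_flux cs hf]
          rw [ih (cs.drop 5) (by simp; omega)]
        · exact pvAB_nonflux cs hne hf
  exact fun cs => H cs.length cs (Nat.le_refl _)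

-- ===== VERDICT (by name: the statement is the Claim_ definition above) =====
theorem humanize_label_py_spec : Claim_equal_humanize_label_py := by
  intro key _
  unfold Spec_humanize_label_py humanize_label_py humanize_label_py_alt
  exact congrArg String.mk (pvAB key.toList)
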